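-- pv_equiv track=rewrite | github.com/Kusk24/DSA | Mid Term Exam Preparation/PairsOfElements.py | count_pairs_with_condition
-- ===== SOURCE A (Python) =====
-- def count_pairs_with_condition(n, arr):
--         count = 0
--         value_map = {}
--
--         for i in range(1, n + 1):
--             value_i = arr[i - 1] + i**2
--             if value_i in value_map:
--                 value_map[value_i] += 1
--             else:
--                 value_map[value_i] = 1
--
--         for j in range(1, n + 1):
--             value_j = arr[j - 1] - j**2
--             if value_j in value_map:
--                 count += value_map[value_j]
--
--         return count
-- ===== SOURCE B (Python) =====
-- def count_pairs_with_condition(n, arr):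
--     # Brute force over ordered index pairs: no hash map at all.
--     # Counts pairs (i, j) with arr[i-1] + i*i == arr[j-1] - j*j directly.
--     count = 0
--     for j in range(1, n + 1):
--         target = arr[j - 1] - j * j
--         for i in range(1, n + 1):
--             if arr[i - 1] + i * i == target:
--                 count += 1
--     return count
-- ===== Notes on version B (the rewrite author's own statement) =====
-- stated objective: simpler
-- what changed: A's frequency map (build dict of arr[i-1]+i^2 counts, then look each arr[j-1]-j^2 up) is removed entirely: B counts matching ordered index pairs with a direct nested scan, no auxiliary data structure.
import Mathlib
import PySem

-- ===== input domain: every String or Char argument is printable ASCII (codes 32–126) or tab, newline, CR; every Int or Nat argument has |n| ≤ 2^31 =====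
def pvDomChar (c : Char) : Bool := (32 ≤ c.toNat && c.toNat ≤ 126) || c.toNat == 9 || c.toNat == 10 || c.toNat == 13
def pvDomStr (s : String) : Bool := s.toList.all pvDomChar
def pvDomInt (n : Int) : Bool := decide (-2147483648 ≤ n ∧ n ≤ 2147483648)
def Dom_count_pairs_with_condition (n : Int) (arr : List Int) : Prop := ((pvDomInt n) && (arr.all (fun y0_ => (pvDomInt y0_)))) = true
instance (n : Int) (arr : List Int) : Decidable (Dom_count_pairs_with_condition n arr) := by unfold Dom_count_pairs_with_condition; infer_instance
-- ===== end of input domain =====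

-- B drops A's frequency map and counts matching index pairs with a direct nested
-- scan (simpler: no auxiliary data structure; O(n^2) instead of A's O(n)).

-- ===== PORT A =====
-- arr[i-1] is ported as pyGetD with default 0: under Pre_ the index is always in range.
def count_pairs_with_condition (n : Int) (arr : List Int) : Int :=
  let value_map : PySem.Dict Int Int :=
    (PySem.List.pyRange 1 (n + 1) 1).foldl
      (fun vm i =>
        let value_i := PySem.List.pyGetD arr (i - 1) 0 + i ^ 2
        if vm.contains value_i then vm.modify value_i 0 (· + 1)
        else vm.insert value_i 1)
      PySem.Dict.empty
  (PySem.List.pyRange 1 (n + 1) 1).foldl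
    (fun count j =>
      let value_j := PySem.List.pyGetD arr (j - 1) 0 - j ^ 2
      if value_map.contains value_j then count + value_map.getD value_j 0 else count)
    0

-- ===== PORT B =====
def count_pairs_with_condition_alt (n : Int) (arr : List Int) : Int :=
  (PySem.List.pyRange 1 (n + 1) 1).foldl
    (fun count j =>
      let target := PySem.List.pyGetD arr (j - 1) 0 - j * j
      (PySem.List.pyRange 1 (n + 1) 1).foldl
        (fun c i =>
          if PySem.List.pyGetD arr (i - 1) 0 + i * i = target then c + 1 else c)
        count)
    0

-- ===== PRECONDITION & SPEC =====
-- Pre_ excludes n > len(arr): there arr[i-1] raises IndexError in the Python A (and in B).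
def Pre_count_pairs_with_condition (n : Int) (arr : List Int) : Prop :=
  n ≤ (arr.length : Int)
instance (n : Int) (arr : List Int) : Decidable (Pre_count_pairs_with_condition n arr) := by
  unfold Pre_count_pairs_with_condition; infer_instance

def pvWitness_count_pairs_with_condition : Int × List Int := (3, [1, -2, 3])

def Spec_count_pairs_with_condition (n : Int) (arr : List Int) (out : Int) : Prop := out = count_pairs_with_condition_alt n arr
instance (n : Int) (arr : List Int) (out : Int) : Decidable (Spec_count_pairs_with_condition n arr out) := by unfold Spec_count_pairs_with_condition; infer_instance

-- ===== CLAIM (what is proved, stated in full; the proofs are below) =====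
def Claim_equal_count_pairs_with_condition : Prop := ∀ (n : Int) (arr : List Int), Dom_count_pairs_with_condition n arr → Pre_count_pairs_with_condition n arr → Spec_count_pairs_with_condition n arr (count_pairs_with_condition n arr)

-- ===== LEMMAS AND PROOFS =====

-- A's conditional dict update is exactly Counter's modify step.
theorem dictStepA (d : PySem.Dict Int Int) (x : Int) :
    (if d.contains x then d.modify x 0 (· + 1) else d.insert x 1) = d.modify x 0 (· + 1) := by
  by_cases h : d.contains x
  · simp [h]
  · have h' : d.contains x = false := by simpa using h
    simp only [h, Bool.false_eq_true, if_false, PySem.Dict.modify,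
      PySem.Dict.getD_of_not_contains d (0 : Int) h']
    norm_num

-- A's accumulation step: a guarded counter lookup adds exactly the count in P.
theorem countStep (P : List Int) (v acc : Int) :
    (if (PySem.Dict.counter P).contains v then acc + (PySem.Dict.counter P).getD v 0 else acc)
      = acc + (P.count v : Int) := by
  by_cases hm : v ∈ P
  · simp [PySem.Dict.contains_counter, PySem.Dict.getD_counter, hm]
  · simp [PySem.Dict.contains_counter, hm, List.count_eq_zero.mpr hm]

-- B's inner scan adds exactly the number of matches of t among f-values of l.
theorem innerScan (l : List Int) (f : Int → Int) (t acc : Int) :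
    l.foldl (fun c i => if f i = t then c + 1 else c) acc
      = acc + ((l.map f).count t : Int) := by
  induction l generalizing acc with
  | nil => simp
  | cons a l ih =>
    simp only [List.foldl_cons, List.map_cons, ih]
    by_cases h : f a = t
    · simp [h, List.count_cons]; ring
    · have : ¬ (t = f a) := fun hh => h hh.symm
      simp [h, List.count_cons, this]

theorem main_eq (n : Int) (arr : List Int) :
    count_pairs_with_condition n arr = count_pairs_with_condition_alt n arr := by
  unfold count_pairs_with_condition count_pairs_with_condition_alt
  simp only [pow_two]
  set R := PySem.List.pyRange 1 (n + 1) 1 with hR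
  set fP : Int → Int := fun i => PySem.List.pyGetD arr (i - 1) 0 + i * i with hfP
  set fM : Int → Int := fun i => PySem.List.pyGetD arr (i - 1) 0 - i * i with hfM
  -- A's dict is the counter of R.map fP
  have hA : R.foldl
      (fun vm i => if vm.contains (fP i) then vm.modify (fP i) 0 (· + 1)
                   else vm.insert (fP i) 1) PySem.Dict.empty
      = PySem.Dict.counter (R.map fP) := by
    rw [PySem.List.foldl_congr_mem R _ (fun vm i => vm.modify (fP i) 0 (· + 1)) _
      (fun acc x _ => dictStepA acc (fP x))]
    rw [← List.foldl_map (f := fP) (g := fun (d : PySem.Dict Int Int) x => d.modify x 0 fun v => v + 1),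
      PySem.Dict.counter_eq_foldl]
  rw [hA]
  -- A's second scan adds, for each j, the count of fM j in R.map fP …
  rw [PySem.List.foldl_congr_mem R _
    (fun c j => c + (((R.map fP).count (fM j) : Nat) : Int)) 0
    (fun acc x _ => countStep (R.map fP) (fM x) acc)]
  -- … and so does B's inner scan.
  rw [PySem.List.foldl_congr_mem R
    (fun count j => R.foldl (fun c i => if fP i = fM j then c + 1 else c) count)
    (fun c j => c + (((R.map fP).count (fM j) : Nat) : Int)) 0
    (fun acc x _ => innerScan R fP (fM x) acc)]

-- ===== VERDICT (by name: the statement is the Claim_ definition above) =====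
theorem count_pairs_with_condition_spec : Claim_equal_count_pairs_with_condition := by
  intro n arr _ _
  exact main_eq n arr
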